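-- pv_equiv track=rewrite | github.com/swwind/minnow | analyze.py | find_longest_streaks
-- ===== SOURCE A (Python) =====
-- def find_longest_streaks(pings, total_requests, lost_seqs):
--     longest_success_streak = 0
--     longest_loss_streak = 0
--
--     current_success_streak = 0
--     current_loss_streak = 0
--
--     # 记录成功和失败状态
--     success_status = [1 if i not in lost_seqs else 0 for i in range(1, total_requests + 1)]
--
--     for status in success_status:
--         if status == 1:
--             current_success_streak += 1
--             longest_success_streak = max(longest_success_streak, current_success_streak)
--             current_loss_streak = 0
--         else:
--             current_loss_streak += 1
--             longest_loss_streak = max(longest_loss_streak, current_loss_streak)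
--             current_success_streak = 0
--
--     return longest_success_streak, longest_loss_streak
-- ===== SOURCE B (Python) =====
-- def find_longest_streaks(pings, total_requests, lost_seqs):
--     # Derive both answers from the sorted distinct in-range lost numbers: the
--     # longest success streak is the largest gap between consecutive lost numbers
--     # (including the edges), the longest loss streak the longest consecutive run.
--     lost = sorted({q for q in lost_seqs if 1 <= q <= total_requests})
--     best_s = 0
--     best_l = 0
--     prev = 0
--     run_l = 0
--     for q in lost:
--         best_s = max(best_s, q - prev - 1)
--         run_l = run_l + 1 if (run_l > 0 and q == prev + 1) else 1
--         best_l = max(best_l, run_l)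
--         prev = q
--     return max(best_s, total_requests - prev), best_l
-- ===== Notes on version B (the rewrite author's own statement) =====
-- stated objective: alternative
-- what changed: Instead of materialising a 0/1 status list for every request 1..total_requests with a linear membership scan per element, B sorts the distinct in-range lost sequence numbers once and reads the longest success streak off the gaps between consecutive lost numbers and the longest loss streak off the longest run of consecutive lost numbers.
import Mathlib
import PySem

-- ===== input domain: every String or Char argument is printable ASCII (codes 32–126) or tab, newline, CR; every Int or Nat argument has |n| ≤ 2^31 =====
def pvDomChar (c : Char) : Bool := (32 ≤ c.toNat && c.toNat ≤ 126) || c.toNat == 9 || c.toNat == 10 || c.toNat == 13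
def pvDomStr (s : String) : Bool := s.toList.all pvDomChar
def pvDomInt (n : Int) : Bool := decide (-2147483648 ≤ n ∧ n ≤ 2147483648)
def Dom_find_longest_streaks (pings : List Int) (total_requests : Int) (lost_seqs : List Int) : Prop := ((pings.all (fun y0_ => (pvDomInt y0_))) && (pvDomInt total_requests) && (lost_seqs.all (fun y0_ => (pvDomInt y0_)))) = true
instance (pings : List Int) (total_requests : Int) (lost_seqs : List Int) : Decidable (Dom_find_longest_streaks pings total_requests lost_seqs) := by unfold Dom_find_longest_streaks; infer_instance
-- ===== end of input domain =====

-- B replaces A's per-request scan of lost_seqs by one sort of the distinct in-range lost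
-- numbers, reading both streaks off gaps/runs of that sorted list (objective: alternative).

-- ===== PORT A =====
-- loop state = (longest_success_streak, longest_loss_streak, current_success_streak, current_loss_streak)
def pvAStep (s : Int × Int × Int × Int) (status : Int) : Int × Int × Int × Int :=
  if status = 1 then (max s.1 (s.2.2.1 + 1), s.2.1, s.2.2.1 + 1, 0)
  else (s.1, max s.2.1 (s.2.2.2 + 1), 0, s.2.2.2 + 1)

def find_longest_streaks (pings : List Int) (total_requests : Int) (lost_seqs : List Int) : Int × Int :=
  let success_status : List Int :=
    (PySem.List.pyRange 1 (total_requests + 1) 1).map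
      (fun i => if ¬ (i ∈ lost_seqs) then 1 else 0)
  let st := success_status.foldl pvAStep (0, 0, 0, 0)
  (st.1, st.2.1)

-- ===== PORT B =====
-- loop state = (best_s, best_l, prev, run_l)
def pvBStep (s : Int × Int × Int × Int) (q : Int) : Int × Int × Int × Int :=
  let bs := max s.1 (q - s.2.2.1 - 1)
  let rl := if s.2.2.2 > 0 ∧ q = s.2.2.1 + 1 then s.2.2.2 + 1 else 1
  (bs, max s.2.1 rl, q, rl)

def find_longest_streaks_alt (pings : List Int) (total_requests : Int) (lost_seqs : List Int) : Int × Int :=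
  let lost := PySem.List.sorted
    (PySem.Set.ofList (lost_seqs.filter (fun q => decide (1 ≤ q ∧ q ≤ total_requests))))
    (fun x => x) false
  let st := lost.foldl pvBStep (0, 0, 0, 0)
  (max st.1 (total_requests - st.2.2.1), st.2.1)

-- ===== PRECONDITION & SPEC =====
def Spec_find_longest_streaks (pings : List Int) (total_requests : Int) (lost_seqs : List Int) (out : Int × Int) : Prop := out = find_longest_streaks_alt pings total_requests lost_seqs
instance (pings : List Int) (total_requests : Int) (lost_seqs : List Int) (out : Int × Int) : Decidable (Spec_find_longest_streaks pings total_requests lost_seqs out) := by unfold Spec_find_longest_streaks; infer_instance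

-- ===== CLAIM (what is proved, stated in full; the proofs are below) =====
def Claim_equal_find_longest_streaks : Prop := ∀ (pings : List Int) (total_requests : Int) (lost_seqs : List Int), Dom_find_longest_streaks pings total_requests lost_seqs → Spec_find_longest_streaks pings total_requests lost_seqs (find_longest_streaks pings total_requests lost_seqs)

-- ===== LEMMAS AND PROOFS =====

-- A's streaming state after requests 1..m.
def pvAFold (lost_seqs : List Int) (m : Int) : Int × Int × Int × Int :=
  ((PySem.List.pyRange 1 (m + 1) 1).map
    (fun i => if ¬ (i ∈ lost_seqs) then (1 : Int) else 0)).foldl pvAStep (0, 0, 0, 0)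

-- B's state after consuming the lost numbers ≤ m.
def pvBFold (T : List Int) (m : Int) : Int × Int × Int × Int :=
  (T.filter (fun q => decide (q ≤ m))).foldl pvBStep (0, 0, 0, 0)

lemma pvAFold_succ (lost_seqs : List Int) (m : Int) (hm : 0 ≤ m) :
    pvAFold lost_seqs (m + 1) =
      pvAStep (pvAFold lost_seqs m) (if ¬ ((m + 1) ∈ lost_seqs) then 1 else 0) := by
  unfold pvAFold
  rw [PySem.List.pyRange_one_succ_right (by omega : (1 : Int) ≤ m + 1)]
  rw [List.map_append, List.foldl_append]
  simp

-- Splitting a strictly increasing list's ≤-filter at the next bound.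
lemma pvFilterSucc (T : List Int) (hT : T.Pairwise (· < ·)) (k : Int) :
    T.filter (fun q => decide (q ≤ k + 1)) =
      T.filter (fun q => decide (q ≤ k)) ++ (if (k + 1) ∈ T then [k + 1] else []) := by
  induction T with
  | nil => simp
  | cons x t ih =>
    rcases List.pairwise_cons.mp hT with ⟨hlt, ht⟩
    by_cases hx : x ≤ k
    · have hne : ¬ (k + 1 = x) := by omega
      simp [hx, show x ≤ k + 1 by omega, ih ht, hne]
    · by_cases hx1 : x = k + 1
      · have h1 : t.filter (fun q => decide (q ≤ k)) = [] := by
          apply List.filter_eq_nil_iff.mpr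
          intro a ha; have := hlt a ha; simp; omega
        have h2 : t.filter (fun q => decide (q ≤ k + 1)) = [] := by
          apply List.filter_eq_nil_iff.mpr
          intro a ha; have := hlt a ha; simp; omega
        simp [hx1, h1, h2]
      · have h1 : t.filter (fun q => decide (q ≤ k)) = [] := by
          apply List.filter_eq_nil_iff.mpr
          intro a ha; have := hlt a ha; simp; omega
        have h2 : t.filter (fun q => decide (q ≤ k + 1)) = [] := by
          apply List.filter_eq_nil_iff.mpr
          intro a ha; have := hlt a ha; simp; omega
        have hnm : ¬ ((k + 1) ∈ x :: t) := by
          simp only [List.mem_cons, not_or]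
          exact ⟨by omega, fun hmem => by have := hlt _ hmem; omega⟩
        simp [h1, h2, hnm, show ¬x ≤ k + 1 by omega, show ¬x ≤ k by omega]

lemma pvBFold_succ (T : List Int) (hT : T.Pairwise (· < ·)) (m : Int) :
    pvBFold T (m + 1) =
      if (m + 1) ∈ T then pvBStep (pvBFold T m) (m + 1) else pvBFold T m := by
  unfold pvBFold
  rw [pvFilterSucc T hT m]
  by_cases h : (m + 1) ∈ T <;> simp [h]

-- The loop invariant relating A's streaming state over 1..k to B's state over the lost
-- numbers ≤ k.
lemma pvInvariant (total : Int) (lost_seqs : List Int) (T : List Int)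
    (hT : T.Pairwise (· < ·))
    (hmem : ∀ x, x ∈ T ↔ x ∈ lost_seqs ∧ 1 ≤ x ∧ x ≤ total)
    (k : Nat) (hk : (k : Int) ≤ total) :
    (pvAFold lost_seqs k).1 = max (pvBFold T k).1 ((k : Int) - (pvBFold T k).2.2.1) ∧
    (pvAFold lost_seqs k).2.1 = (pvBFold T k).2.1 ∧
    (pvAFold lost_seqs k).2.2.1 = (k : Int) - (pvBFold T k).2.2.1 ∧
    (pvAFold lost_seqs k).2.2.2 =
      (if (pvBFold T k).2.2.1 = (k : Int) then (pvBFold T k).2.2.2 else 0) ∧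
    0 ≤ (pvBFold T k).2.2.1 ∧ (pvBFold T k).2.2.1 ≤ (k : Int) ∧
    ((pvBFold T k).2.2.2 = 0 ↔ (pvBFold T k).2.2.1 = 0) ∧
    0 ≤ (pvBFold T k).1 ∧ 0 ≤ (pvBFold T k).2.2.2 := by
  induction k with
  | zero =>
    have hfil : T.filter (fun q => decide (q ≤ (0 : Int))) = [] := by
      apply List.filter_eq_nil_iff.mpr
      intro a ha; have := (hmem a).mp ha; simp; omega
    have hrange : PySem.List.pyRange 1 ((0 : Int) + 1) 1 = [] :=
      PySem.List.pyRange_one_eq_nil (by omega)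
    simp [pvAFold, pvBFold, hfil]
  | succ k ih =>
    have hk' : (k : Int) ≤ total := by push_cast at hk ⊢; omega
    obtain ⟨h1, h2, h3, h4, h5, h6, h7, h8, h9⟩ := ih hk'
    have hc : (((k + 1 : Nat)) : Int) = (k : Int) + 1 := by push_cast; ring
    rw [hc, pvAFold_succ lost_seqs (k : Int) (by omega),
        pvBFold_succ T hT (k : Int)]
    by_cases hin : ((k : Int) + 1) ∈ T
    · have hlost : ((k : Int) + 1) ∈ lost_seqs := ((hmem _).mp hin).1
      rw [if_pos hin, if_neg (not_not_intro hlost)]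
      simp [pvAStep, pvBStep]
      split_ifs at h4 ⊢ <;> omega
    · have hlost : ¬ (((k : Int) + 1) ∈ lost_seqs) := by
        intro h; exact hin ((hmem _).mpr ⟨h, by omega, by push_cast at hk; omega⟩)
      rw [if_neg hin, if_pos hlost]
      simp [pvAStep]
      split_ifs at h4 ⊢ <;> omega

theorem find_longest_streaks_spec : Claim_equal_find_longest_streaks := by
  intro pings total lost_seqs _
  unfold Spec_find_longest_streaks find_longest_streaks find_longest_streaks_alt
  set T := PySem.List.sorted
    (PySem.Set.ofList (lost_seqs.filter (fun q => decide (1 ≤ q ∧ q ≤ total))))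
    (fun x => x) false with hTdef
  have hT : T.Pairwise (· < ·) := PySem.List.sorted_ofList_pairwise_lt _
  have hmem : ∀ x, x ∈ T ↔ x ∈ lost_seqs ∧ 1 ≤ x ∧ x ≤ total := by
    intro x
    rw [hTdef, PySem.List.mem_sorted, PySem.Set.mem_ofList, List.mem_filter]
    simp
  by_cases htot : 0 ≤ total
  · have hk : ((total.toNat : Nat) : Int) = total := Int.toNat_of_nonneg htot
    obtain ⟨h1, h2, h3, h4, h5, h6, h7, h8, h9⟩ :=
      pvInvariant total lost_seqs T hT hmem total.toNat (by omega)
    have hfil : T.filter (fun q => decide (q ≤ ((total.toNat : Nat) : Int))) = T := by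
      apply List.filter_eq_self.mpr
      intro a ha; have := (hmem a).mp ha; simp; omega
    have hA : pvAFold lost_seqs ((total.toNat : Nat) : Int) =
        ((PySem.List.pyRange 1 (total + 1) 1).map
          (fun i => if ¬ (i ∈ lost_seqs) then (1 : Int) else 0)).foldl pvAStep (0, 0, 0, 0) := by
      rw [pvAFold, hk]
    have hB : pvBFold T ((total.toNat : Nat) : Int) = T.foldl pvBStep (0, 0, 0, 0) := by
      rw [pvBFold, hfil]
    rw [hA, hB, hk] at h1
    rw [hA, hB] at h2
    simp only []
    rw [Prod.ext_iff]
    exact ⟨h1, h2⟩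
  · have hrange : PySem.List.pyRange 1 (total + 1) 1 = [] :=
      PySem.List.pyRange_one_eq_nil (by omega)
    have hTnil : T = [] := by
      apply List.eq_nil_iff_forall_not_mem.mpr
      intro a ha; have := (hmem a).mp ha; omega
    simp [hrange, hTnil]
    omega
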